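-- pv_equiv track=rewrite | github.com/gracequeen/endless-terminals-playground | tasks_opus/task_000000_20cb0939/test_initial_state.py | get_permission_string
-- ===== SOURCE A (Python) =====
-- import stat
--
-- def get_permission_string(mode):
--     """Convert a file mode to a permission string like -rw-r--r--"""
--     is_dir = stat.S_ISDIR(mode)
--     prefix = 'd' if is_dir else '-'
--
--     perms = ''
--     for who in ['USR', 'GRP', 'OTH']:
--         for what in ['R', 'W', 'X']:
--             perm_bit = getattr(stat, f'S_I{what}{who}')
--             if mode & perm_bit:
--                 perms += what.lower()
--             else:
--                 perms += '-'
--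
--     return prefix + perms
-- ===== SOURCE B (Python) =====
-- def get_permission_string(mode):
--     """Convert a file mode to a permission string like -rw-r--r--"""
--     prefix = 'd' if (mode & 0o170000) == 0o40000 else '-'
--     chars = []
--     for i, ch in enumerate('rwxrwxrwx'):
--         chars.append(ch if mode & (0o400 >> i) else '-')
--     return prefix + ''.join(chars)
-- ===== Notes on version B (the rewrite author's own statement) =====
-- stated objective: idiomatic
-- what changed: Replaces the nested USR/GRP/OTH x R/W/X loop with per-bit getattr on stat constants by a single stat.filemode-style flat walk over the char table 'rwxrwxrwx', testing mode against the shifting mask 0o400 >> i.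
import Mathlib
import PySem

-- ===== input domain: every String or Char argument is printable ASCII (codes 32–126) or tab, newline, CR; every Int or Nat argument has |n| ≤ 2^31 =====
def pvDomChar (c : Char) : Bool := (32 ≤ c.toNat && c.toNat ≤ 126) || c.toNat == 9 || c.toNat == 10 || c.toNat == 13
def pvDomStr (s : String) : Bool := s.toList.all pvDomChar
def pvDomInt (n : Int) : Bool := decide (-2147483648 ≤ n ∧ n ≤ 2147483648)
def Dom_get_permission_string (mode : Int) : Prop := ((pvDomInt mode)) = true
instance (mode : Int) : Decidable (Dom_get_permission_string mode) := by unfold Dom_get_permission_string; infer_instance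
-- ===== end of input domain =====

-- ===== PORT A =====
-- B changes only the control flow: a flat bitmask walk over 'rwxrwxrwx' instead of A's nested getattr loop; same return value.
-- getattr(stat, 'S_I'+what+who): the stat permission constant table
def permBit (what who : String) : Int :=
  if who = "USR" then (if what = "R" then 256 else if what = "W" then 128 else 64)
  else if who = "GRP" then (if what = "R" then 32 else if what = "W" then 16 else 8)
  else (if what = "R" then 4 else if what = "W" then 2 else 1)

def get_permission_string (mode : Int) : String :=
  let is_dir := (PySem.Int.band mode 0o170000) == 0o40000   -- stat.S_ISDIR (A)
  let pre := if is_dir then "d" else "-"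
  let perms := ["USR", "GRP", "OTH"].foldl (fun acc who =>
    ["R", "W", "X"].foldl (fun acc2 what =>
      let perm_bit := permBit what who
      if (PySem.Int.band mode perm_bit) ≠ 0 then acc2 ++ PySem.Str.lower what else acc2 ++ "-") acc) ""
  pre ++ perms

-- ===== PORT B =====
def get_permission_string_alt (mode : Int) : String :=
  let pre := if (PySem.Int.band mode 0o170000) == 0o40000 then "d" else "-"   -- stat.S_ISDIR
  let chars := (PySem.List.enumerate "rwxrwxrwx".toList).foldl (fun acc (p : Int × Char) =>
    acc ++ [if (PySem.Int.band mode ((256 : Int) >>> p.1.toNat)) ≠ 0 then p.2 else '-']) []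
  pre ++ String.ofList chars

-- ===== PRECONDITION & SPEC =====
-- Pre_ excludes exactly the negative modes, on which A (stat.S_ISDIR) raises OverflowError.
def Pre_get_permission_string (mode : Int) : Prop := 0 ≤ mode
instance (mode : Int) : Decidable (Pre_get_permission_string mode) := by unfold Pre_get_permission_string; infer_instance
def pvWitness_get_permission_string : Int := (493)

def Spec_get_permission_string (mode : Int) (out : String) : Prop := out = get_permission_string_alt mode
instance (mode : Int) (out : String) : Decidable (Spec_get_permission_string mode out) := by unfold Spec_get_permission_string; infer_instance

-- ===== CLAIM (what is proved, stated in full; the proofs are below) =====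
def Claim_equal_get_permission_string : Prop := ∀ (mode : Int), Dom_get_permission_string mode → Pre_get_permission_string mode → Spec_get_permission_string mode (get_permission_string mode)

-- ===== LEMMAS AND PROOFS =====
-- canonical form both ports are reduced to
def pvChar (mode b : Int) (ch : Char) : Char :=
  if PySem.Int.band mode b = 0 then '-' else ch

def pvCanon (mode : Int) : String :=
  (if (PySem.Int.band mode 0o170000 == 0o40000) = true then "d" else "-") ++
  String.ofList [pvChar mode 256 'r', pvChar mode 128 'w', pvChar mode 64 'x',
                 pvChar mode 32 'r', pvChar mode 16 'w', pvChar mode 8 'x',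
                 pvChar mode 4 'r', pvChar mode 2 'w', pvChar mode 1 'x']

-- pull the accumulator out of A's per-step if
theorem pvIteApp (p : Prop) [Decidable p] (a x y : String) :
    (if p then a ++ x else a ++ y) = a ++ (if p then x else y) := by split <;> rfl

theorem pvSdash : ("-" : String) = String.ofList ['-'] := rfl

theorem pvIte2 (p : Prop) [Decidable p] (a b : Char) :
    (if p then String.ofList [a] else String.ofList [b]) = String.ofList [if p then a else b] := by
  split <;> rfl

theorem pvLowR : PySem.Str.lower "R" = String.ofList ['r'] := by decide
theorem pvLowW : PySem.Str.lower "W" = String.ofList ['w'] := by decide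
theorem pvLowX : PySem.Str.lower "X" = String.ofList ['x'] := by decide

-- the nine masks 0o400 >> i, evaluated
theorem pvSh1 : (256 : Int) >>> (1 : Nat) = 128 := by decide
theorem pvSh2 : (256 : Int) >>> (2 : Nat) = 64 := by decide
theorem pvSh3 : (256 : Int) >>> (3 : Nat) = 32 := by decide
theorem pvSh4 : (256 : Int) >>> (4 : Nat) = 16 := by decide
theorem pvSh5 : (256 : Int) >>> (5 : Nat) = 8 := by decide
theorem pvSh6 : (256 : Int) >>> (6 : Nat) = 4 := by decide
theorem pvSh7 : (256 : Int) >>> (7 : Nat) = 2 := by decide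
theorem pvSh8 : (256 : Int) >>> (8 : Nat) = 1 := by decide

theorem pvA_eq (mode : Int) : get_permission_string mode = pvCanon mode := by
  unfold get_permission_string pvCanon pvChar
  simp only [List.foldl_cons, List.foldl_nil, permBit, pvIteApp,
    String.reduceEq, reduceIte, pvLowR, pvLowW, pvLowX, ite_not]
  simp only [pvSdash, pvIte2]
  simp only [String.empty_append]
  simp only [← String.ofList_append]
  simp

theorem pvB_eq (mode : Int) : get_permission_string_alt mode = pvCanon mode := by
  unfold get_permission_string_alt pvCanon pvChar
  simp [pvSh1, pvSh2, pvSh3, pvSh4, pvSh5, pvSh6, pvSh7, pvSh8, ite_not]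

-- ===== VERDICT (by name: the statement is the Claim_ definition above) =====
theorem get_permission_string_spec : Claim_equal_get_permission_string := by
  intro mode _ _
  unfold Spec_get_permission_string
  rw [pvA_eq, pvB_eq]
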